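-- pv_equiv track=rewrite | github.com/AxelSiliezar/CSE015 | CSE015/lab05.py | is_a_graph
-- ===== SOURCE A (Python) =====
-- f = {('Hello', 1), ('World', 2), ('!', 3)}
--
-- def is_a_graph(A, B, f):
--     for counter in f:
--         a = counter[0]
--         b = counter[1]
--         for index in f:
--             if index != counter:
--                 checker = index[0]
--                 if a == checker:
--                     return False
--     return True
-- ===== SOURCE B (Python) =====
-- def is_a_graph(A, B, f):
--     return len({pair[0] for pair in f}) == len(set(f))
-- ===== Notes on version B (the rewrite author's own statement) =====
-- stated objective: simpler
-- what changed: Replaces the nested pairwise scan with a single counting step: collect the distinct first components and the distinct pairs and compare their counts (two distinct pairs share a first component iff there are fewer distinct firsts than distinct pairs).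
import Mathlib
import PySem

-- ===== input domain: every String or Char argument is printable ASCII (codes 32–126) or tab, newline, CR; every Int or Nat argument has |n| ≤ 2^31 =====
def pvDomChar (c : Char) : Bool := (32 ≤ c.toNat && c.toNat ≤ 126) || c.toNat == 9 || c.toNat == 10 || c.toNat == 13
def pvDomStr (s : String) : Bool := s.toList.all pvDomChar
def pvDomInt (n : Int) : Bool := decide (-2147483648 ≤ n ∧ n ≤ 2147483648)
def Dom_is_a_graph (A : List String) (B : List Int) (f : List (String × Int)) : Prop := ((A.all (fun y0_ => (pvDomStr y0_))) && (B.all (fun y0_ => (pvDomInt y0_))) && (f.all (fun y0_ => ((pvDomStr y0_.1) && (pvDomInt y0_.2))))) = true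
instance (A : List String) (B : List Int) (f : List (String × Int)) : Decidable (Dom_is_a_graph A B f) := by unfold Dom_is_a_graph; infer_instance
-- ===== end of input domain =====

-- B replaces A's nested pairwise scan by building the set of distinct firsts and the set of
-- distinct pairs once and comparing their sizes (objective: simpler).
-- ===== PORT A =====
-- inner 'for index in f' loop of A
def isAGraphInner (counter : String × Int) : List (String × Int) → Bool
  | [] => true
  | idx :: rest =>
    if idx ≠ counter then
      if counter.1 == idx.1 then false else isAGraphInner counter rest
    else isAGraphInner counter rest

-- outer 'for counter in f' loop of A
def isAGraphOuter (f : List (String × Int)) : List (String × Int) → Bool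
  | [] => true
  | c :: rest => isAGraphInner c f && isAGraphOuter f rest

def is_a_graph (A : List String) (B : List Int) (f : List (String × Int)) : Bool :=
  isAGraphOuter f f

-- ===== PORT B =====
def is_a_graph_alt (A : List String) (B : List Int) (f : List (String × Int)) : Bool :=
  PySem.Set.len (PySem.Set.ofList (f.map (fun pair => pair.1)))
    == PySem.Set.len (PySem.Set.ofList f)

-- ===== PRECONDITION & SPEC =====
def Spec_is_a_graph (A : List String) (B : List Int) (f : List (String × Int)) (out : Bool) : Prop := out = is_a_graph_alt A B f
instance (A : List String) (B : List Int) (f : List (String × Int)) (out : Bool) : Decidable (Spec_is_a_graph A B f out) := by unfold Spec_is_a_graph; infer_instance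

-- ===== CLAIM (what is proved, stated in full; the proofs are below) =====
def Claim_equal_is_a_graph : Prop := ∀ (A : List String) (B : List Int) (f : List (String × Int)), Dom_is_a_graph A B f → Spec_is_a_graph A B f (is_a_graph A B f)

-- ===== LEMMAS AND PROOFS =====

-- ===== VERDICT (by name: the statement is the Claim_ definition above) =====
lemma inner_iff (c : String × Int) (l : List (String × Int)) :
    isAGraphInner c l = true ↔ ∀ q ∈ l, q ≠ c → q.1 ≠ c.1 := by
  induction l with
  | nil => simp [isAGraphInner]
  | cons x t ih =>
    simp only [isAGraphInner]
    split_ifs with h1 h2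
    · simp only [false_iff]
      push Not
      exact ⟨x, List.mem_cons_self, h1, (beq_iff_eq.mp h2).symm⟩
    · rw [ih]
      constructor
      · intro h q hq hne
        rcases List.mem_cons.mp hq with rfl | hq
        · intro he; exact h2 (by simpa using he.symm)
        · exact h q hq hne
      · intro h q hq hne; exact h q (List.mem_cons_of_mem _ hq) hne
    · rw [ih]
      constructor
      · intro h q hq hne
        rcases List.mem_cons.mp hq with rfl | hq
        · exact absurd hne (by simpa using h1)
        · exact h q hq hne
      · intro h q hq hne; exact h q (List.mem_cons_of_mem _ hq) hne

lemma outer_iff (f : List (String × Int)) (l : List (String × Int)) :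
    isAGraphOuter f l = true ↔ ∀ c ∈ l, isAGraphInner c f = true := by
  induction l with
  | nil => simp [isAGraphOuter]
  | cons x t ih => simp [isAGraphOuter, ih]

lemma a_iff (A : List String) (B : List Int) (f : List (String × Int)) :
    is_a_graph A B f = true ↔ Set.InjOn Prod.fst {x | x ∈ f} := by
  rw [is_a_graph, outer_iff]
  constructor
  · intro h p hp q hq he
    by_contra hne
    exact (inner_iff q f).mp (h q hq) p hp hne he
  · intro h c hc
    rw [inner_iff]
    intro q hq hne he
    exact hne (h hq hc he)

lemma len_ofList {α : Type} [BEq α] [LawfulBEq α] [DecidableEq α] (xs : List α) :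
    (PySem.Set.ofList xs).length = xs.toFinset.card := by
  have hnd : (PySem.Set.ofList xs).Nodup := PySem.Set.nodup_ofList xs
  have : (PySem.Set.ofList xs).toFinset = xs.toFinset := by
    ext x; simp [PySem.Set.mem_ofList xs x]
  rw [← List.toFinset_card_of_nodup hnd, this]

lemma b_iff (A : List String) (B : List Int) (f : List (String × Int)) :
    is_a_graph_alt A B f = true ↔ Set.InjOn Prod.fst {x | x ∈ f} := by
  have hmap : f.map (fun pair => pair.1) = f.map Prod.fst := rfl
  have himg : (f.map Prod.fst).toFinset = f.toFinset.image Prod.fst := by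
    ext x; simp
  simp only [is_a_graph_alt, PySem.Set.len, beq_iff_eq, Nat.cast_inj, hmap]
  rw [len_ofList, len_ofList, himg, Finset.card_image_iff, List.coe_toFinset]

theorem is_a_graph_spec : Claim_equal_is_a_graph := by
  intro A B f _
  unfold Spec_is_a_graph
  rw [Bool.eq_iff_iff, a_iff, b_iff]
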